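-- pv_equiv track=rewrite | github.com/Yuchen-Song/Natural-Language-Processing-Course-Spring-2022 | NLP_lab1/lab1_task2_ans.py | calculate_bow
-- ===== SOURCE A (Python) =====
-- def calculate_bow(corpus):
--     def vectorize(sentence, vocab):
--         return [sentence.split().count(i) for i in vocab]
--
--     vectorized_corpus = []
--     vocab = sorted(set([token for doc in corpus for token in doc.lower().split()]))
--     for i in corpus:
--         vectorized_corpus.append((i, vectorize(i, vocab)))
--     return vectorized_corpus, vocab
-- ===== SOURCE B (Python) =====
-- def calculate_bow(corpus):
--     vocab = sorted(set(token for doc in corpus for token in doc.lower().split()))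
--     index = {w: i for i, w in enumerate(vocab)}
--     result = []
--     for sentence in corpus:
--         vec = [0] * len(vocab)
--         for token in sentence.split():
--             if token in index:
--                 vec[index[token]] += 1
--         result.append((sentence, vec))
--     return result, vocab
-- ===== Notes on version B (the rewrite author's own statement) =====
-- stated objective: faster
-- what changed: Instead of scanning each sentence's token list once per vocab word (count per column), B builds a word-to-column index dict once and scatters each sentence's tokens into a preallocated zero vector, so each sentence is traversed once.
import Mathlib
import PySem

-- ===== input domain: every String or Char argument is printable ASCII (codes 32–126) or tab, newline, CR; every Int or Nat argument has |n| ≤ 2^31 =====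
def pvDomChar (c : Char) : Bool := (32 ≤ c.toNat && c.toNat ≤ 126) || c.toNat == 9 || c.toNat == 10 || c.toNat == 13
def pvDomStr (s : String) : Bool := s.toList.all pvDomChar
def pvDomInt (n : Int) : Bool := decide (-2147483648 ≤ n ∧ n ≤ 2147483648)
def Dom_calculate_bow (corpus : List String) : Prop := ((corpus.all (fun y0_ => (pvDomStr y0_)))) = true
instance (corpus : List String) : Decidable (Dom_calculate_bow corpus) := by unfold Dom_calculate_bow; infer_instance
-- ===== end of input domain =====

-- Header: B replaces A's per-vocab-word count scans with a single scatter pass per sentence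
-- over a word→column index dict; same return value, fewer sentence traversals.


-- ===== PORT A =====
-- vectorize(sentence, vocab) = [sentence.split().count(i) for i in vocab]
def pvVectorize (sentence : String) (vocab : List String) : List Int :=
  vocab.map (fun i => (PySem.List.count (PySem.Str.split₀ sentence) i : Int))

def calculate_bow (corpus : List String) : (List (String × List Int)) × List String :=
  let vocab := PySem.List.sorted
    (PySem.Set.ofList (corpus.flatMap (fun doc => PySem.Str.split₀ (PySem.Str.lower doc))))
    (fun x => x) false
  let vectorized_corpus :=
    corpus.foldl (fun acc i => acc ++ [(i, pvVectorize i vocab)]) []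
  (vectorized_corpus, vocab)

-- ===== PORT B =====
-- index = {w: i for i, w in enumerate(vocab)}
def pvIndex (vocab : List String) : PySem.Dict String Int :=
  (PySem.List.enumerate vocab 0).foldl (fun d p => d.insert p.2 p.1) PySem.Dict.empty

-- inner loop: for token in sentence.split(): if token in index: vec[index[token]] += 1
def pvScatter (index : PySem.Dict String Int) (tokens : List String) (vec : List Int) : List Int :=
  tokens.foldl (fun vec token =>
    match index.get? token with
    | some i => PySem.List.pySetD vec i (PySem.List.pyGetD vec i 0 + 1)
    | none => vec) vec

def calculate_bow_alt (corpus : List String) : (List (String × List Int)) × List String :=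
  let vocab := PySem.List.sorted
    (PySem.Set.ofList (corpus.flatMap (fun doc => PySem.Str.split₀ (PySem.Str.lower doc))))
    (fun x => x) false
  let index := pvIndex vocab
  let result :=
    corpus.foldl (fun acc sentence =>
      acc ++ [(sentence, pvScatter index (PySem.Str.split₀ sentence) (List.replicate vocab.length (0 : Int)))]) []
  (result, vocab)

-- ===== PRECONDITION & SPEC =====
def Spec_calculate_bow (corpus : List String) (out : (List (String × List Int)) × List String) : Prop := out = calculate_bow_alt corpus
instance (corpus : List String) (out : (List (String × List Int)) × List String) : Decidable (Spec_calculate_bow corpus out) := by unfold Spec_calculate_bow; infer_instance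

-- ===== CLAIM (what is proved, stated in full; the proofs are below) =====
def Claim_equal_calculate_bow : Prop := ∀ (corpus : List String), Dom_calculate_bow corpus → Spec_calculate_bow corpus (calculate_bow corpus)

-- ===== LEMMAS AND PROOFS =====

-- vocab (sorted set) has no duplicates
theorem pvVocab_nodup (L : List String) :
    (PySem.List.sorted (PySem.Set.ofList L) (fun x => x) false).Nodup :=
  ((PySem.List.sorted_perm (PySem.Set.ofList L) (fun x => x) false).nodup_iff).mpr
    (PySem.Set.nodup_ofList L)

-- the index dict's items are (vocab[k], k)
theorem pvIndex_items (vocab : List String) (hnd : vocab.Nodup) :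
    (pvIndex vocab).items = (PySem.List.enumerate vocab 0).map (fun p => (p.2, p.1)) := by
  unfold pvIndex
  rw [PySem.Dict.items_foldl_insert_fresh (PySem.List.enumerate vocab 0)
        (fun p => p.2) (fun p => p.1) PySem.Dict.empty
        (fun a _ => PySem.Dict.contains_empty a.2)
        (by rw [PySem.List.map_snd_enumerate]; exact hnd)]
  simp [PySem.Dict.empty]

theorem pvIndex_keys (vocab : List String) (hnd : vocab.Nodup) :
    (pvIndex vocab).keys = vocab := by
  have h := pvIndex_items vocab hnd
  simp only [PySem.Dict.keys, h, List.map_map]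
  exact PySem.List.map_snd_enumerate vocab 0

theorem pvIndex_get_inv (vocab : List String) (hnd : vocab.Nodup) (t : String) (i : Int)
    (h : (pvIndex vocab).get? t = some i) :
    ∃ (k : Nat), ∃ (hk : k < vocab.length), t = vocab[k] ∧ i = (k : Int) := by
  have hm := PySem.Dict.mem_items_of_get?_eq_some _ h
  rw [pvIndex_items vocab hnd] at hm
  obtain ⟨p, hp, hpe⟩ := List.mem_map.mp hm
  obtain ⟨k, hk, rfl⟩ := (PySem.List.mem_enumerate_iff vocab 0 p).mp hp
  simp only [Prod.mk.injEq] at hpe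
  exact ⟨k, hk, hpe.1.symm, by omega⟩

-- scatter computes the per-column counts
theorem pvScatter_spec (vocab : List String) (hnd : vocab.Nodup) (tokens : List String) :
    ∀ (vec : List Int), vec.length = vocab.length →
      pvScatter (pvIndex vocab) tokens vec =
        (List.range vocab.length).map (fun (j : Nat) => PySem.List.pyGetD vec (j : Int) 0 + (tokens.count (vocab.getD j "") : Int)) := by
  induction tokens with
  | nil =>
    intro vec hlen
    apply List.ext_getElem
    · simp [pvScatter, hlen]
    · intro j h1 h2
      simp only [pvScatter, List.foldl_nil, List.getElem_map, List.getElem_range,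
        PySem.List.pyGetD_natCast, List.count_nil]
      rw [List.getD_eq_getElem vec 0 (by simpa [hlen] using h2)]
      simp
  | cons t ts ih =>
    intro vec hlen
    have hstep : pvScatter (pvIndex vocab) (t :: ts) vec =
        pvScatter (pvIndex vocab) ts
          (match (pvIndex vocab).get? t with
           | some i => PySem.List.pySetD vec i (PySem.List.pyGetD vec i 0 + 1)
           | none => vec) := rfl
    rw [hstep]
    cases hget : (pvIndex vocab).get? t with
    | none =>
      have ht : t ∉ vocab := by
        rw [PySem.Dict.get?_eq_none_iff_not_mem_keys, pvIndex_keys vocab hnd] at hget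
        exact hget
      show pvScatter (pvIndex vocab) ts vec = _
      rw [ih vec hlen]
      apply List.map_congr_left
      intro j hj
      have hjn : j < vocab.length := List.mem_range.mp hj
      have hne : vocab.getD j "" ≠ t := by
        rw [List.getD_eq_getElem vocab "" hjn]
        intro he; exact ht (he ▸ List.getElem_mem hjn)
      rw [List.count_cons, if_neg (by simpa using (Ne.symm hne))]
      simp
    | some i =>
      obtain ⟨k, hk, rfl, rfl⟩ := pvIndex_get_inv vocab hnd t i hget
      show pvScatter (pvIndex vocab) ts
        (PySem.List.pySetD vec (k : Int) (PySem.List.pyGetD vec (k : Int) 0 + 1)) = _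
      rw [ih _ (by rw [PySem.List.length_pySetD]; exact hlen)]
      apply List.map_congr_left
      intro j hj
      have hjn : j < vocab.length := List.mem_range.mp hj
      rw [PySem.List.pyGetD_pySetD_natCast vec k j _ 0 (by omega)]
      rw [List.count_cons]
      by_cases hjk : j = k
      · subst hjk
        rw [List.getD_eq_getElem vocab "" hjn]
        simp
        omega
      · have hne : vocab.getD j "" ≠ vocab[k] := by
          rw [List.getD_eq_getElem vocab "" hjn]
          intro he
          exact hjk ((List.Nodup.getElem_inj_iff hnd).mp he)
        rw [if_neg hjk, if_neg (by simpa using (Ne.symm hne))]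
        simp
    
theorem pvScatter_eq_vectorize (vocab : List String) (hnd : vocab.Nodup) (sentence : String) :
    pvScatter (pvIndex vocab) (PySem.Str.split₀ sentence) (List.replicate vocab.length (0 : Int)) =
      pvVectorize sentence vocab := by
  rw [pvScatter_spec vocab hnd _ _ (List.length_replicate)]
  apply List.ext_getElem
  · simp [pvVectorize]
  · intro j h1 h2
    simp only [List.getElem_map, List.getElem_range, PySem.List.pyGetD_natCast, pvVectorize]
    have hjn : j < vocab.length := by simpa using h1
    rw [List.getD_eq_getElem vocab "" hjn]
    simp [PySem.List.count_eq]

-- ===== VERDICT (by name: the statement is the Claim_ definition above) =====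
theorem calculate_bow_spec : Claim_equal_calculate_bow := by
  intro corpus _
  unfold Spec_calculate_bow calculate_bow calculate_bow_alt
  set vocab := PySem.List.sorted
    (PySem.Set.ofList (corpus.flatMap (fun doc => PySem.Str.split₀ (PySem.Str.lower doc))))
    (fun x => x) false with hv
  have hnd : vocab.Nodup := pvVocab_nodup _
  refine Prod.ext ?_ rfl
  simp only []
  congr 1
  funext acc s
  rw [pvScatter_eq_vectorize vocab hnd s]
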